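/- GENERATED by mk_final_copies.py from the proof of the farm's unit `start_decoder.C3a` (farm:start_decoder.C3a.1: Proof.lean) as the
   re-elaboration sweep compiled it — do not edit. -/
/-
  WORKED PROOF of the unit `start_decoder.C3a`: `AtC3` → `AtC3L` by the two walks of Lemmas.lean (`c3a_reach_cut102` over the call of
  get_bits, `c3a_reach_loop8` to the loop head).
-/
import Asan.CheckWalk
import Vorbis.Spec.StartDecoderATest
import Vorbis.Spec.Units.start_decoder_C3a
import Vorbis.Spec.Worked.start_decoder_C3a_Lemmas

open X86 X86.User Asan Vorbis Vorbis.Spec Vorbis.Spec.StartDecoder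

namespace Vorbis.Spec.start_decoder_C3a

/-- Segment C3a: the entry assertion to the return of `get_bits(f, 5)`, from there to the head of loop 3776. -/
theorem segC3a_walk {Lay : Layout} (hLay : Lay.hi = 0x1000000) {μ : Microarch} (hμ : UserX.MicroOK μ) {u₀ : State}
    (hcode : HasCodeNat Lay u₀ Vorbis.L.start_decoder.entry Vorbis.Code.code_start_decoder.nat Vorbis.L.start_decoder.size)
    (h_get_bits : ∀ (others : List Obj) (frames : List (Nat × FrameLayout)) (Blk : Block → Prop) (len : Nat),
      Calls Lay μ Vorbis.WayInv (Vorbis.conv u₀) Vorbis.L.get_bits.entry (Vorbis.Spec.get_bits.spec others frames Blk len)) :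
    SegC3a Lay μ u₀ := by
  intro g i v hat
  obtain ⟨A, A2, A3, Ai, h⟩ := hat
  refine (c3a_reach_cut102 hLay hμ hcode h_get_bits h).trans ?_
  intro v1 h1
  refine (c3a_reach_loop8 hLay hμ hcode h1.1 h1.2).mono ?_
  intro w hw
  exact ⟨A, A2, A3, Ai, hw⟩

end Vorbis.Spec.start_decoder_C3a

theorem Vorbis.Spec.Worked.start_decoder_C3a_ok : Vorbis.Spec.start_decoder_C3a.Statement := by
  intro Lay hLay μ hμ u₀ hcode h_get_bits
  exact Vorbis.Spec.start_decoder_C3a.segC3a_walk hLay hμ hcode h_get_bits
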